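-- pv_equiv track=rewrite | github.com/microscaler/rerp | tooling/src/rerp_tooling/bff/generate_system.py | _schema_name_mapping
-- ===== SOURCE A (Python) =====
-- from typing import Any
--
-- def _to_pascal_case(name: str) -> str:
--     return "".join(word.capitalize() for word in name.split("-"))
--
-- def _schema_name_mapping(
--     all_schemas: dict[str, Any],
--     sub_services: dict[str, Any],
-- ) -> dict[str, list[str]]:
--     mapping: dict[str, list[str]] = {}
--     for prefixed in sorted(all_schemas.keys()):
--         for sname in sorted(sub_services.keys()):
--             prefix = _to_pascal_case(sname)
--             if prefixed.startswith(prefix):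
--                 unprefixed = prefixed[len(prefix) :]
--                 if unprefixed not in mapping:
--                     mapping[unprefixed] = []
--                 mapping[unprefixed].append(prefixed)
--     return mapping
-- ===== SOURCE B (Python) =====
-- def _to_pascal_case(name: str) -> str:
--     return "".join(word.capitalize() for word in name.split("-"))
--
-- def _schema_name_mapping(all_schemas, sub_services):
--     # Index the pascal-cased sub-service prefixes once: prefix -> positions in sorted order.
--     index: dict[str, list[int]] = {}
--     for i, sname in enumerate(sorted(sub_services.keys())):
--         index.setdefault(_to_pascal_case(sname), []).append(i)
--     mapping: dict[str, list[str]] = {}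
--     for name in sorted(all_schemas.keys()):
--         # Walk the schema's own prefixes instead of scanning every sub-service.
--         matches = []
--         for k in range(len(name) + 1):
--             for i in index.get(name[:k], ()):
--                 matches.append((i, name[k:]))
--         matches.sort(key=lambda m: m[0])
--         for _, key in matches:
--             mapping.setdefault(key, []).append(name)
--     return mapping
-- ===== Notes on version B (the rewrite author's own statement) =====
-- stated objective: faster
-- what changed: Instead of testing every pascal-cased sub-service prefix against every schema name, B builds a hash index prefix->positions once and walks each schema's own prefixes, sorting the few hits by sub-service position to keep A's exact append and key-insertion order.
import Mathlib
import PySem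

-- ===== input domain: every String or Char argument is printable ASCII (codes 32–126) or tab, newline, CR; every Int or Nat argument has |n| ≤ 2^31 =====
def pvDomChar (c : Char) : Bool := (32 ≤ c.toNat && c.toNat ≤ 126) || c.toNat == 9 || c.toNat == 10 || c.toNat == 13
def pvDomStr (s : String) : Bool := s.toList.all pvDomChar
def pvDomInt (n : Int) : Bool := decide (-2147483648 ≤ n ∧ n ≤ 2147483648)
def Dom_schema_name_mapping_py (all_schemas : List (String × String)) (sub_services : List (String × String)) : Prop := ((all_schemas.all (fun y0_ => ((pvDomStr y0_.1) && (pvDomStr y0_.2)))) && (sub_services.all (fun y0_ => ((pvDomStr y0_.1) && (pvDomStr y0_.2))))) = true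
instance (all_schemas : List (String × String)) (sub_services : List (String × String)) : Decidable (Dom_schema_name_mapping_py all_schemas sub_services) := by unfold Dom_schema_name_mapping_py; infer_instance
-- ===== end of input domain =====

-- B replaces A's inner scan of every sub-service per schema by a prefix index built once,
-- walking each schema's own prefixes (objective: faster).

-- ===== PORT A =====
-- word.capitalize(): first char upper-cased, rest lower-cased (exact on the ASCII domain Dom)
def pvCapL (w : List Char) : List Char :=
  match w with
  | [] => []
  | c :: rest => c.toUpper :: PySem.Chars.lower rest

-- _to_pascal_case: "".join(word.capitalize() for word in name.split("-"))
def pvPascalL (s : List Char) : List Char :=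
  PySem.Chars.join [] ((PySem.Chars.splitOn s ['-']).map pvCapL)

def pvPascalStr (s : String) : String := String.ofList (pvPascalL s.toList)

def schema_name_mapping_py (all_schemas : List (String × String)) (sub_services : List (String × String)) : List (String × List String) :=
  let m := (PySem.List.sorted ((PySem.Dict.ofList all_schemas).keys) (fun k => k) false).foldl
    (fun (m : PySem.Dict String (List String)) prefixed =>
      (PySem.List.sorted ((PySem.Dict.ofList sub_services).keys) (fun k => k) false).foldl
        (fun m sname =>
          let pfx := pvPascalStr sname
          if PySem.Str.startswith prefixed pfx then
            -- "if unprefixed not in mapping: mapping[unprefixed] = []" then ".append(prefixed)"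
            -- is exactly Dict.modify with default []
            m.modify (PySem.Str.slice prefixed (some (PySem.Str.len pfx)) none) [] (fun v => v ++ [prefixed])
          else m) m)
    PySem.Dict.empty
  m.items

-- ===== PORT B =====
-- index.setdefault(_to_pascal_case(sname), []).append(i) over enumerate(sorted(sub_services))
def pvBuildIndex (serviceKeys : List String) : PySem.Dict (List Char) (List Int) :=
  (PySem.List.enumerate serviceKeys 0).foldl
    (fun d p => d.modify (pvPascalL p.2.toList) [] (fun v => v ++ [p.1])) PySem.Dict.empty

-- for k in range(len(name)+1): for i in index.get(name[:k], ()): matches.append((i, name[k:]))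
def pvMatches (idx : PySem.Dict (List Char) (List Int)) (t : List Char) : List (Int × List Char) :=
  (List.range (t.length + 1)).foldl
    (fun acc k => acc ++ (idx.getD (t.take k) []).map (fun i => (i, t.drop k))) []

def schema_name_mapping_py_alt (all_schemas : List (String × String)) (sub_services : List (String × String)) : List (String × List String) :=
  let idx := pvBuildIndex (PySem.List.sorted ((PySem.Dict.ofList sub_services).keys) (fun k => k) false)
  let m := (PySem.List.sorted ((PySem.Dict.ofList all_schemas).keys) (fun k => k) false).foldl
    (fun (m : PySem.Dict String (List String)) name =>
      -- matches.sort(key=lambda m: m[0]); mapping.setdefault(key, []).append(name) ≡ Dict.modify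
      (PySem.List.sorted (pvMatches idx name.toList) (fun pr => pr.1) false).foldl
        (fun m pr => m.modify (String.ofList pr.2) [] (fun v => v ++ [name])) m)
    PySem.Dict.empty
  m.items

-- ===== PRECONDITION & SPEC =====
def Spec_schema_name_mapping_py (all_schemas : List (String × String)) (sub_services : List (String × String)) (out : List (String × List String)) : Prop := out = schema_name_mapping_py_alt all_schemas sub_services
instance (all_schemas : List (String × String)) (sub_services : List (String × String)) (out : List (String × List String)) : Decidable (Spec_schema_name_mapping_py all_schemas sub_services out) := by unfold Spec_schema_name_mapping_py; infer_instance

-- ===== CLAIM (what is proved, stated in full; the proofs are below) =====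
def Claim_equal_schema_name_mapping_py : Prop := ∀ (all_schemas : List (String × String)) (sub_services : List (String × String)), Dom_schema_name_mapping_py all_schemas sub_services → Spec_schema_name_mapping_py all_schemas sub_services (schema_name_mapping_py all_schemas sub_services)

-- ===== LEMMAS AND PROOFS =====

-- a fold that conditionally applies a step is the fold over the filtered, mapped list
theorem pv_foldl_if_filter_map {α β κ : Type} (l : List α) (p : α → Bool) (h : α → κ)
    (step : β → κ → β) (m : β) :
    l.foldl (fun m x => if p x then step m (h x) else m) m
      = ((l.filter p).map h).foldl step m := by
  induction l generalizing m with
  | nil => rfl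
  | cons a l ih =>
    by_cases hp : p a = true <;> simp [hp, ih]

-- filtering/mapping an enumerate through its second component forgets the indices
theorem pv_enumerate_filter_map_snd {α κ : Type} (l : List α) (s : Int)
    (q : α → Bool) (g : α → κ) :
    (((PySem.List.enumerate l s).filter (fun p => q p.2)).map (fun p => g p.2))
      = (l.filter q).map g := by
  induction l generalizing s with
  | nil => rfl
  | cons a l ih =>
    rw [PySem.List.enumerate_cons]
    by_cases hq : q a = true <;> simp [hq, ih]

-- characterisation of the grouped-append fold (setdefault(...).append)
theorem pv_getD_foldl_modify_append {α κ ν : Type} [BEq κ] [LawfulBEq κ] [DecidableEq κ]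
    (key : α → κ) (val : α → ν) (l : List α) (d : PySem.Dict κ (List ν)) (q : κ) :
    (l.foldl (fun d x => d.modify (key x) [] (fun v => v ++ [val x])) d).getD q []
      = d.getD q [] ++ ((l.filter (fun x => key x == q)).map val) := by
  induction l generalizing d with
  | nil => simp
  | cons a l ih =>
    simp only [List.foldl_cons, ih, List.filter_cons]
    rw [PySem.Dict.getD_modify]
    by_cases h : q = key a
    · simp [h]
    · have hne : ¬ key a = q := fun hh => h hh.symm
      simp [if_neg h, hne]

theorem pv_getD_buildIndex (sk : List String) (q : List Char) :
    (pvBuildIndex sk).getD q []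
      = (((PySem.List.enumerate sk 0).filter (fun p => pvPascalL p.2.toList == q)).map (fun p => p.1)) := by
  unfold pvBuildIndex
  rw [pv_getD_foldl_modify_append (fun (p : Int × String) => pvPascalL p.2.toList) (fun p => p.1)]
  simp [PySem.Dict.empty, PySem.Dict.getD, PySem.Dict.get?]

theorem pv_mem_getD_buildIndex (sk : List String) (q : List Char) (i : Int) :
    i ∈ (pvBuildIndex sk).getD q [] ↔
      ∃ m : Nat, ∃ _ : m < sk.length, i = (m : Int) ∧ pvPascalL (sk[m]).toList = q := by
  rw [pv_getD_buildIndex]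
  simp only [List.mem_map, List.mem_filter, PySem.List.mem_enumerate_iff, beq_iff_eq]
  constructor
  · rintro ⟨p, ⟨⟨m, hm, rfl⟩, hq⟩, rfl⟩
    exact ⟨m, hm, by simp, hq⟩
  · rintro ⟨m, hm, rfl, hq⟩
    exact ⟨((m : Int), sk[m]), ⟨⟨m, hm, by simp⟩, hq⟩, rfl⟩

theorem pv_nodup_getD_buildIndex (sk : List String) (q : List Char) :
    ((pvBuildIndex sk).getD q []).Nodup := by
  rw [pv_getD_buildIndex]
  have h1 : ((PySem.List.enumerate sk 0).filter (fun p => pvPascalL p.2.toList == q)).Pairwise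
      (fun p q => p.1 < q.1) :=
    (PySem.List.pairwise_lt_enumerate sk 0).filter _
  have h2 := (List.pairwise_map (f := fun p : Int × String => p.1)
      (R := fun a b : Int => a < b)).mpr h1
  exact h2.imp (fun h => ne_of_lt h)

theorem pv_matches_eq_flatMap (idx : PySem.Dict (List Char) (List Int)) (t : List Char) :
    pvMatches idx t
      = (List.range (t.length + 1)).flatMap
          (fun k => (idx.getD (t.take k) []).map (fun i => (i, t.drop k))) := by
  unfold pvMatches
  rw [PySem.List.foldl_append_eq_flatMap]
  simp

theorem pv_mem_matches (sk : List String) (t : List Char) (x : Int × List Char) :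
    x ∈ pvMatches (pvBuildIndex sk) t ↔
      ∃ m : Nat, ∃ _ : m < sk.length,
        pvPascalL (sk[m]).toList <+: t ∧ x = ((m : Int), t.drop (pvPascalL (sk[m]).toList).length) := by
  rw [pv_matches_eq_flatMap]
  simp only [List.mem_flatMap, List.mem_range, List.mem_map, pv_mem_getD_buildIndex]
  constructor
  · rintro ⟨k, hk, i, ⟨m, hm, rfl, hq⟩, rfl⟩
    have hkle : k ≤ t.length := Nat.lt_succ_iff.mp hk
    have hpre : pvPascalL (sk[m]).toList <+: t := hq ▸ List.take_prefix k t
    have hlen : (pvPascalL (sk[m]).toList).length = k := by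
      rw [hq, List.length_take]; omega
    exact ⟨m, hm, hpre, by rw [hlen]⟩
  · rintro ⟨m, hm, hpre, rfl⟩
    refine ⟨(pvPascalL (sk[m]).toList).length, Nat.lt_succ_iff.mpr hpre.length_le, (m : Int),
      ⟨m, hm, rfl, ?_⟩, rfl⟩
    exact List.prefix_iff_eq_take.mp hpre

theorem pv_nodup_matches (sk : List String) (t : List Char) :
    (pvMatches (pvBuildIndex sk) t).Nodup := by
  rw [pv_matches_eq_flatMap]
  rw [List.nodup_flatMap]
  constructor
  · intro k _
    exact (pv_nodup_getD_buildIndex sk (t.take k)).map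
      (fun a b h => by simpa using congrArg Prod.fst h)
  · have hp : List.Pairwise (· < ·) (List.range (t.length + 1)) := List.pairwise_lt_range
    refine hp.imp_of_mem ?_
    intro k1 k2 h1mem h2mem hlt x hx1 hx2
    have hk1 : k1 ≤ t.length := Nat.lt_succ_iff.mp (List.mem_range.mp h1mem)
    have hk2 : k2 ≤ t.length := Nat.lt_succ_iff.mp (List.mem_range.mp h2mem)
    simp only [List.mem_map, pv_mem_getD_buildIndex] at hx1 hx2
    obtain ⟨i, ⟨m1, hm1, rfl, hq1⟩, rfl⟩ := hx1
    obtain ⟨j, ⟨m2, hm2, hij, hq2⟩, hx⟩ := hx2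
    have hm : m1 = m2 := by
      have := congrArg Prod.fst hx
      simp at this
      omega
    subst hm
    have htk : t.take k1 = t.take k2 := by rw [← hq1, ← hq2]
    have := congrArg List.length htk
    simp [List.length_take] at this
    omega

-- the sorted match list is exactly the enumerate of sorted sub-services filtered by startswith
theorem pv_sorted_matches_eq (sk : List String) (t : List Char) :
    PySem.List.sorted (pvMatches (pvBuildIndex sk) t) (fun pr => pr.1) false
      = ((PySem.List.enumerate sk 0).filter (fun p => PySem.Chars.startswith t (pvPascalL p.2.toList))).map
          (fun p => (p.1, t.drop (pvPascalL p.2.toList).length)) := by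
  have htp : (((PySem.List.enumerate sk 0).filter (fun p => PySem.Chars.startswith t (pvPascalL p.2.toList))).map
      (fun p => (p.1, t.drop (pvPascalL p.2.toList).length))).Pairwise (fun a b => a.1 < b.1) := by
    refine List.pairwise_map.mpr ?_
    exact ((PySem.List.pairwise_lt_enumerate sk 0).filter _).imp (fun h => h)
  have htn : (((PySem.List.enumerate sk 0).filter (fun p => PySem.Chars.startswith t (pvPascalL p.2.toList))).map
      (fun p => (p.1, t.drop (pvPascalL p.2.toList).length))).Nodup :=
    htp.imp (fun h heq => by subst heq; exact lt_irrefl _ h)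
  apply PySem.List.sorted_eq_of_perm_of_pairwise_lt
  · rw [List.perm_ext_iff_of_nodup htn (pv_nodup_matches sk t)]
    intro x
    rw [pv_mem_matches]
    simp only [List.mem_map, List.mem_filter, PySem.List.mem_enumerate_iff]
    constructor
    · rintro ⟨p, ⟨⟨m, hm, rfl⟩, hsw⟩, rfl⟩
      have hpre : pvPascalL (sk[m]).toList <+: t := by
        simpa [PySem.Chars.startswith, List.isPrefixOf_iff_prefix] using hsw
      exact ⟨m, hm, hpre, by simp⟩
    · rintro ⟨m, hm, hpre, rfl⟩
      refine ⟨((m : Int), sk[m]), ⟨⟨m, hm, by simp⟩, ?_⟩, by simp⟩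
      simpa [PySem.Chars.startswith, List.isPrefixOf_iff_prefix] using hpre
  · exact htp

-- per-schema key sequences coincide
theorem pv_keys_eq (sk : List String) (name : String) :
    ((PySem.List.sorted (pvMatches (pvBuildIndex sk) name.toList) (fun pr => pr.1) false).map
        (fun pr => String.ofList pr.2))
      = ((sk.filter (fun s => PySem.Str.startswith name (pvPascalStr s))).map
          (fun s => PySem.Str.slice name (some (PySem.Str.len (pvPascalStr s))) none)) := by
  rw [pv_sorted_matches_eq, List.map_map]
  have h2 := pv_enumerate_filter_map_snd sk 0
    (fun s => PySem.Chars.startswith name.toList (pvPascalL s.toList))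
    (fun s => String.ofList (name.toList.drop (pvPascalL s.toList).length))
  have hsw : ∀ s : String, PySem.Str.startswith name (pvPascalStr s)
      = PySem.Chars.startswith name.toList (pvPascalL s.toList) := by
    intro s
    simp [PySem.Str.startswith_eq, pvPascalStr]
  have hsl : ∀ s : String, PySem.Str.slice name (some (PySem.Str.len (pvPascalStr s))) none
      = String.ofList (name.toList.drop (pvPascalL s.toList).length) := by
    intro s
    rw [PySem.Str.slice, PySem.Chars.slice_eq_listSlice, PySem.Str.len_eq]
    rw [PySem.List.slice_from _ (by positivity)]
    simp [pvPascalStr]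
  calc (((PySem.List.enumerate sk 0).filter (fun p => PySem.Chars.startswith name.toList (pvPascalL p.2.toList))).map
          ((fun pr : Int × List Char => String.ofList pr.2) ∘ (fun p : Int × String => (p.1, name.toList.drop (pvPascalL p.2.toList).length))))
      = (sk.filter (fun s => PySem.Chars.startswith name.toList (pvPascalL s.toList))).map
          (fun s => String.ofList (name.toList.drop (pvPascalL s.toList).length)) := h2
    _ = (sk.filter (fun s => PySem.Str.startswith name (pvPascalStr s))).map
          (fun s => PySem.Str.slice name (some (PySem.Str.len (pvPascalStr s))) none) := by
        rw [List.filter_congr (fun s _ => (hsw s).symm)]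
        exact List.map_congr_left (fun s _ => (hsl s).symm)

-- per-schema inner loops coincide
theorem pv_inner_eq (sk : List String) (name : String) (m : PySem.Dict String (List String)) :
    (sk.foldl (fun m sname =>
        let pfx := pvPascalStr sname
        if PySem.Str.startswith name pfx then
          m.modify (PySem.Str.slice name (some (PySem.Str.len pfx)) none) [] (fun v => v ++ [name])
        else m) m)
      = ((PySem.List.sorted (pvMatches (pvBuildIndex sk) name.toList) (fun pr => pr.1) false).foldl
          (fun m pr => m.modify (String.ofList pr.2) [] (fun v => v ++ [name])) m) := by
  show (sk.foldl (fun m sname =>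
      if PySem.Str.startswith name (pvPascalStr sname) then
        m.modify (PySem.Str.slice name (some (PySem.Str.len (pvPascalStr sname))) none) [] (fun v => v ++ [name])
      else m) m) = _
  rw [pv_foldl_if_filter_map sk
    (fun s => PySem.Str.startswith name (pvPascalStr s))
    (fun s => PySem.Str.slice name (some (PySem.Str.len (pvPascalStr s))) none)
    (fun m k => m.modify k [] (fun v => v ++ [name])) m]
  rw [← pv_keys_eq sk name, List.foldl_map]

-- ===== VERDICT (by name: the statement is the Claim_ definition above) =====
theorem schema_name_mapping_py_spec : Claim_equal_schema_name_mapping_py := by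
  unfold Claim_equal_schema_name_mapping_py
  intro all_schemas sub_services _
  unfold Spec_schema_name_mapping_py schema_name_mapping_py schema_name_mapping_py_alt
  simp only []
  congr 1
  have hfun : (fun (m : PySem.Dict String (List String)) prefixed =>
      (PySem.List.sorted ((PySem.Dict.ofList sub_services).keys) (fun k => k) false).foldl
        (fun m sname =>
          let pfx := pvPascalStr sname
          if PySem.Str.startswith prefixed pfx then
            m.modify (PySem.Str.slice prefixed (some (PySem.Str.len pfx)) none) [] (fun v => v ++ [prefixed])
          else m) m)
      = (fun (m : PySem.Dict String (List String)) name =>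
      (PySem.List.sorted (pvMatches (pvBuildIndex (PySem.List.sorted ((PySem.Dict.ofList sub_services).keys) (fun k => k) false)) name.toList) (fun pr => pr.1) false).foldl
        (fun m pr => m.modify (String.ofList pr.2) [] (fun v => v ++ [name])) m) := by
    funext m name
    exact pv_inner_eq _ name m
  rw [hfun]
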